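-- pv_equiv track=rewrite | github.com/NJaiS-88/automl | streamlit_tailored_app/predict_helpers.py | merge_kind_hints
-- ===== SOURCE A (Python) =====
-- def merge_kind_hints(
--     columns: list[str],
--     numeric_set: set[str],
--     categorical_set: set[str],
--     meta_kinds: dict[str, str] | None,
-- ) -> dict[str, str]:
--     meta_kinds = meta_kinds or {}
--     out: dict[str, str] = {}
--     for c in columns:
--         if c in numeric_set:
--             out[c] = "number"
--         elif c in categorical_set:
--             out[c] = "text"
--         elif c in meta_kinds:
--             out[c] = meta_kinds[c]
--         else:
--             out[c] = "text"
--     return out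
-- ===== SOURCE B (Python) =====
-- def merge_kind_hints(
--     columns: list[str],
--     numeric_set: set[str],
--     categorical_set: set[str],
--     meta_kinds: dict[str, str] | None,
-- ) -> dict[str, str]:
--     mk = meta_kinds or {}
--     # layered overlays in reverse priority order: default, meta, categorical, numeric
--     out = {c: "text" for c in columns}
--     for c in columns:
--         if c in mk:
--             out[c] = mk[c]
--     for c in columns:
--         if c in categorical_set:
--             out[c] = "text"
--     for c in columns:
--         if c in numeric_set:
--             out[c] = "number"
--     return out
-- ===== Notes on version B (the rewrite author's own statement) =====
-- stated objective: alternative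
-- what changed: Replaces A's single loop with a four-way priority chain per column by layered dictionary passes: a default 'text' dict over columns, then overlays for meta kinds, categorical ('text'), and numeric ('number') applied in reverse-priority order.
import Mathlib
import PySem

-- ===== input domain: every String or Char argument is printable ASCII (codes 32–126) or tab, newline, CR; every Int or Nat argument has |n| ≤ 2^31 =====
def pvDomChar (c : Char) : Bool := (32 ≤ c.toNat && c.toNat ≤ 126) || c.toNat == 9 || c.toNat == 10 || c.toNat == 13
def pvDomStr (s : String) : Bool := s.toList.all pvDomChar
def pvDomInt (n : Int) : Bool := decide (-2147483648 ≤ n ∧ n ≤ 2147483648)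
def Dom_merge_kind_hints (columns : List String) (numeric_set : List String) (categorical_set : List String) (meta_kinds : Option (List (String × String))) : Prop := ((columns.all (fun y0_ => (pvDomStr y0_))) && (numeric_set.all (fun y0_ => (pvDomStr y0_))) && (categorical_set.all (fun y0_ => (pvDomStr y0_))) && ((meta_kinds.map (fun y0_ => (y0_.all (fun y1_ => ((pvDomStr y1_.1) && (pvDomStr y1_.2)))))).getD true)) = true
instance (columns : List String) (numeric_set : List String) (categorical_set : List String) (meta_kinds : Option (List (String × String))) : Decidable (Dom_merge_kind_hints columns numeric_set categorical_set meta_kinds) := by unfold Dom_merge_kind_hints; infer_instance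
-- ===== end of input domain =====

-- B replaces A's per-column priority chain by layered dict passes (default, meta, categorical, numeric) in reverse-priority order; same cost, different decomposition (objective: alternative).


-- ===== PORT A =====
def merge_kind_hints (columns : List String) (numeric_set : List String) (categorical_set : List String) (meta_kinds : Option (List (String × String))) : List (String × String) :=
  -- meta_kinds = meta_kinds or {}  (None and {} both act as the empty dict)
  let mk : PySem.Dict String String := PySem.Dict.mk (meta_kinds.getD [])
  let out : PySem.Dict String String :=
    columns.foldl (fun out c =>
      if numeric_set.contains c then out.insert c "number"
      else if categorical_set.contains c then out.insert c "text"
      else match mk.get? c with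
        | some v => out.insert c v
        | none => out.insert c "text") PySem.Dict.empty
  out.items

-- ===== PORT B =====
def merge_kind_hints_alt (columns : List String) (numeric_set : List String) (categorical_set : List String) (meta_kinds : Option (List (String × String))) : List (String × String) :=
  let mk : PySem.Dict String String := PySem.Dict.mk (meta_kinds.getD [])
  let d0 : PySem.Dict String String := columns.foldl (fun d c => d.insert c "text") PySem.Dict.empty
  let d1 := columns.foldl (fun d c =>
    match mk.get? c with
    | some v => d.insert c v
    | none => d) d0
  let d2 := columns.foldl (fun d c => if categorical_set.contains c then d.insert c "text" else d) d1
  let d3 := columns.foldl (fun d c => if numeric_set.contains c then d.insert c "number" else d) d2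
  d3.items

-- ===== PRECONDITION & SPEC =====
def Spec_merge_kind_hints (columns : List String) (numeric_set : List String) (categorical_set : List String) (meta_kinds : Option (List (String × String))) (out : List (String × String)) : Prop := out = merge_kind_hints_alt columns numeric_set categorical_set meta_kinds
instance (columns : List String) (numeric_set : List String) (categorical_set : List String) (meta_kinds : Option (List (String × String))) (out : List (String × String)) : Decidable (Spec_merge_kind_hints columns numeric_set categorical_set meta_kinds out) := by unfold Spec_merge_kind_hints; infer_instance

-- ===== CLAIM (what is proved, stated in full; the proofs are below) =====
def Claim_equal_merge_kind_hints : Prop := ∀ (columns : List String) (numeric_set : List String) (categorical_set : List String) (meta_kinds : Option (List (String × String))), Dom_merge_kind_hints columns numeric_set categorical_set meta_kinds → Spec_merge_kind_hints columns numeric_set categorical_set meta_kinds (merge_kind_hints columns numeric_set categorical_set meta_kinds)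

-- ===== LEMMAS AND PROOFS =====

-- the merged kind of a single column (used only in the proofs)
def pvKind (numeric_set categorical_set : List String) (mk : PySem.Dict String String) (c : String) : String :=
  if numeric_set.contains c then "number"
  else if categorical_set.contains c then "text"
  else (mk.get? c).getD "text"

-- a conditional-insert pass, parametrised by what it writes at each column (none = skip)
def pvPass (g : String → Option String) (l : List String) (d : PySem.Dict String String) : PySem.Dict String String :=
  l.foldl (fun d c => match g c with | some v => d.insert c v | none => d) d

lemma pvPass_keys (g : String → Option String) (l : List String) (d : PySem.Dict String String)
    (h : ∀ c ∈ l, d.contains c = true) : (pvPass g l d).keys = d.keys := by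
  induction l generalizing d with
  | nil => rfl
  | cons c l ih =>
    simp only [pvPass, List.foldl_cons] at *
    cases hg : g c with
    | none => exact ih d (fun x hx => h x (List.mem_cons_of_mem _ hx))
    | some v =>
      rw [ih]
      · exact PySem.Dict.keys_insert_of_contains _ _ (h c (List.mem_cons_self ..))
      · intro x hx
        rw [PySem.Dict.contains_insert]
        simp [h x (List.mem_cons_of_mem _ hx)]

lemma pvPass_get? (g : String → Option String) (l : List String) (d : PySem.Dict String String) (k : String) :
    (pvPass g l d).get? k = if k ∈ l ∧ (g k).isSome then g k else d.get? k := by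
  induction l generalizing d with
  | nil => simp [pvPass]
  | cons c l ih =>
    simp only [pvPass, List.foldl_cons] at *
    rw [ih]
    by_cases hkl : k ∈ l ∧ (g k).isSome
    · simp [hkl, List.mem_cons]
    · cases hg : g c with
      | none =>
        by_cases hkc : k = c
        · subst hkc
          simp [hg, List.mem_cons]
        · have hns : ¬((k = c ∨ k ∈ l) ∧ (g k).isSome) := by
            rintro ⟨hk | hk, hs⟩
            · exact hkc hk
            · exact hkl ⟨hk, hs⟩
          simp [hkl, hns, List.mem_cons]
      | some v =>
        by_cases hkc : k = c
        · subst hkc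
          simp [hg, List.mem_cons]
        · rw [PySem.Dict.get?_insert_of_ne _ _ hkc]
          have hns : ¬((k = c ∨ k ∈ l) ∧ (g k).isSome) := by
            rintro ⟨hk | hk, hs⟩
            · exact hkc hk
            · exact hkl ⟨hk, hs⟩
          simp [hkl, hns, List.mem_cons]

-- A's fold is an unconditional pass writing pvKind at each column
lemma pvA_eq_pass (columns numeric_set categorical_set : List String) (mk : PySem.Dict String String) :
    columns.foldl (fun out c =>
      if numeric_set.contains c then out.insert c "number"
      else if categorical_set.contains c then out.insert c "text"
      else match mk.get? c with
        | some v => out.insert c v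
        | none => out.insert c "text") PySem.Dict.empty
    = pvPass (fun c => some (pvKind numeric_set categorical_set mk c)) columns PySem.Dict.empty := by
  unfold pvPass
  congr 1
  funext d c
  unfold pvKind
  by_cases h1 : c ∈ numeric_set
  · simp [h1]
  · by_cases h2 : c ∈ categorical_set
    · simp [h1, h2]
    · cases hg : mk.get? c <;> simp [h1, h2, hg]

lemma pvD0_keys (columns : List String) :
    (pvPass (fun _ => some "text") columns PySem.Dict.empty).keys = PySem.Set.ofList columns := by
  have := PySem.Dict.keys_foldl_insert columns (fun (d : PySem.Dict String String) c => "text") PySem.Dict.empty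
  simpa [pvPass, PySem.Dict.keys_empty, PySem.Set.update_nil_left] using this

lemma pvD0_contains (columns : List String) (c : String) (hc : c ∈ columns) :
    (pvPass (fun _ => some "text") columns PySem.Dict.empty).contains c = true := by
  rw [PySem.Dict.contains_eq_decide_mem_keys, pvD0_keys]
  simp [PySem.Set.mem_ofList, hc]

-- ===== VERDICT (by name: the statement is the Claim_ definition above) =====
theorem merge_kind_hints_spec : Claim_equal_merge_kind_hints := by
  intro columns numeric_set categorical_set meta_kinds _
  unfold Spec_merge_kind_hints merge_kind_hints merge_kind_hints_alt
  simp only []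
  set mk : PySem.Dict String String := PySem.Dict.mk (meta_kinds.getD []) with hmk
  rw [pvA_eq_pass]
  -- name the layered passes of B
  have hd0 : (columns.foldl (fun (d : PySem.Dict String String) c => d.insert c "text") PySem.Dict.empty)
      = pvPass (fun _ => some "text") columns PySem.Dict.empty := rfl
  rw [hd0]
  set d0 := pvPass (fun _ => some "text") columns PySem.Dict.empty with hd0'
  have hd1 : (columns.foldl (fun (d : PySem.Dict String String) c =>
      match mk.get? c with | some v => d.insert c v | none => d) d0)
      = pvPass (fun c => mk.get? c) columns d0 := rfl
  rw [hd1]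
  set d1 := pvPass (fun c => mk.get? c) columns d0 with hd1'
  have hd2 : (columns.foldl (fun (d : PySem.Dict String String) c =>
      if categorical_set.contains c then d.insert c "text" else d) d1)
      = pvPass (fun c => if categorical_set.contains c then some "text" else none) columns d1 := by
    unfold pvPass; congr 1; funext d c; by_cases h : c ∈ categorical_set <;> simp [h]
  rw [hd2]
  set d2 := pvPass (fun c => if categorical_set.contains c then some "text" else none) columns d1 with hd2'
  have hd3 : (columns.foldl (fun (d : PySem.Dict String String) c =>
      if numeric_set.contains c then d.insert c "number" else d) d2)
      = pvPass (fun c => if numeric_set.contains c then some "number" else none) columns d2 := by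
    unfold pvPass; congr 1; funext d c; by_cases h : c ∈ numeric_set <;> simp [h]
  rw [hd3]
  set d3 := pvPass (fun c => if numeric_set.contains c then some "number" else none) columns d2 with hd3'
  set dA := pvPass (fun c => some (pvKind numeric_set categorical_set mk c)) columns PySem.Dict.empty with hdA
  -- keys: every pass after d0 only touches columns, all of which d0 already contains
  have hc1 : ∀ c ∈ columns, d0.contains c = true := fun c hc => pvD0_contains columns c hc
  have hk1 : d1.keys = d0.keys := pvPass_keys _ _ _ hc1
  have hc2 : ∀ c ∈ columns, d1.contains c = true := by
    intro c hc
    rw [PySem.Dict.contains_eq_decide_mem_keys, hk1, ← PySem.Dict.contains_eq_decide_mem_keys]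
    exact hc1 c hc
  have hk2 : d2.keys = d0.keys := by rw [pvPass_keys _ _ _ hc2, hk1]
  have hc3 : ∀ c ∈ columns, d2.contains c = true := by
    intro c hc
    rw [PySem.Dict.contains_eq_decide_mem_keys, hk2, ← PySem.Dict.contains_eq_decide_mem_keys]
    exact hc1 c hc
  have hk3 : d3.keys = d0.keys := by rw [pvPass_keys _ _ _ hc3, hk2]
  have hkA : dA.keys = d0.keys := by
    rw [hdA, hd0', pvD0_keys]
    have := PySem.Dict.keys_foldl_insert columns
      (fun (d : PySem.Dict String String) c => pvKind numeric_set categorical_set mk c) PySem.Dict.empty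
    simpa [pvPass, PySem.Dict.keys_empty, PySem.Set.update_nil_left] using this
  -- get?: both sides return pvKind on columns, none elsewhere
  have e0 : ∀ k, d0.get? k = if k ∈ columns ∧ (some "text" : Option String).isSome then some "text" else PySem.Dict.empty.get? k := by
    intro k; rw [hd0']; exact pvPass_get? _ _ _ _
  have e1 : ∀ k, d1.get? k = if k ∈ columns ∧ (mk.get? k).isSome then mk.get? k else d0.get? k := by
    intro k; rw [hd1']; exact pvPass_get? _ _ _ _
  have e2 : ∀ k, d2.get? k = if k ∈ columns ∧ (if categorical_set.contains k then some "text" else none : Option String).isSome then (if categorical_set.contains k then some "text" else none) else d1.get? k := by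
    intro k; rw [hd2']; exact pvPass_get? _ _ _ _
  have e3 : ∀ k, d3.get? k = if k ∈ columns ∧ (if numeric_set.contains k then some "number" else none : Option String).isSome then (if numeric_set.contains k then some "number" else none) else d2.get? k := by
    intro k; rw [hd3']; exact pvPass_get? _ _ _ _
  have eA : ∀ k, dA.get? k = if k ∈ columns ∧ (some (pvKind numeric_set categorical_set mk k)).isSome then some (pvKind numeric_set categorical_set mk k) else PySem.Dict.empty.get? k := by
    intro k; rw [hdA]; exact pvPass_get? _ _ _ _
  have hget : ∀ k, d3.get? k = dA.get? k := by
    intro k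
    rw [e3 k, e2 k, e1 k, e0 k, eA k]
    unfold pvKind
    by_cases hk : k ∈ columns
    · by_cases hn : k ∈ numeric_set
      · simp [hk, hn]
      · by_cases hcat : k ∈ categorical_set
        · simp [hk, hn, hcat]
        · cases hm : mk.get? k <;> simp [hk, hn, hcat]
    · simp [hk]
  -- nodup keys on both sides
  have hnd0 : d0.keys.Nodup := by
    have := PySem.Dict.nodup_keys_foldl_insert columns (fun (d : PySem.Dict String String) c => "text")
      PySem.Dict.empty (by simp)
    simpa [pvPass, hd0'] using this
  have hnd3 : d3.keys.Nodup := hk3 ▸ hnd0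
  have hndA : dA.keys.Nodup := hkA ▸ hnd0
  -- items equal, hence the returned lists equal
  apply Eq.symm
  rw [PySem.Dict.items_eq_map_keys d3 hnd3 "", PySem.Dict.items_eq_map_keys dA hndA "", hk3, hkA]
  apply List.map_congr_left
  intro k _
  simp [PySem.Dict.getD_eq_get?_getD, hget k]
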